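-- pv_equiv track=rewrite | github.com/ebellbog/banned-together | Assets/Scripts/Utilities/gutenberg_downloader.py | get_text_download_url
-- ===== SOURCE A (Python) =====
-- from typing import List, Dict, Optional
--
-- def get_text_download_url(book: Dict) -> Optional[str]:
--     """Extract the plain text download URL from book data"""
--     formats = book.get('formats', {})
--
--     # Try different text format MIME types in order of preference
--     text_types = [
--         'text/plain; charset=utf-8',
--         'text/plain; charset=us-ascii',
--         'text/plain'
--     ]
--
--     for mime_type in text_types:
--         if mime_type in formats:
--             return formats[mime_type]
--
--     # If no exact match, look for any text/plain format
--     for mime_type, url in formats.items():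
--         if mime_type.startswith('text/plain'):
--             return url
--
--     return None
-- ===== SOURCE B (Python) =====
-- def get_text_download_url(book):
--     """Extract the plain text download URL from book data"""
--     formats = book.get('formats', {})
--     best_rank, best_url = 4, None
--     for mime_type, url in formats.items():
--         if mime_type == 'text/plain; charset=utf-8':
--             rank = 0
--         elif mime_type == 'text/plain; charset=us-ascii':
--             rank = 1
--         elif mime_type == 'text/plain':
--             rank = 2
--         elif mime_type.startswith('text/plain'):
--             rank = 3
--         else:
--             continue
--         if rank < best_rank:
--             best_rank, best_url = rank, url
--     return best_url
-- ===== Notes on version B (the rewrite author's own statement) =====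
-- stated objective: alternative
-- what changed: Replaces the ordered exact-match loop plus a separate prefix-fallback scan with one single pass over formats.items() that ranks each mime type (0-2 exact types, 3 for other text/plain prefixes) and keeps the first lowest-ranked URL.
import Mathlib
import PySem

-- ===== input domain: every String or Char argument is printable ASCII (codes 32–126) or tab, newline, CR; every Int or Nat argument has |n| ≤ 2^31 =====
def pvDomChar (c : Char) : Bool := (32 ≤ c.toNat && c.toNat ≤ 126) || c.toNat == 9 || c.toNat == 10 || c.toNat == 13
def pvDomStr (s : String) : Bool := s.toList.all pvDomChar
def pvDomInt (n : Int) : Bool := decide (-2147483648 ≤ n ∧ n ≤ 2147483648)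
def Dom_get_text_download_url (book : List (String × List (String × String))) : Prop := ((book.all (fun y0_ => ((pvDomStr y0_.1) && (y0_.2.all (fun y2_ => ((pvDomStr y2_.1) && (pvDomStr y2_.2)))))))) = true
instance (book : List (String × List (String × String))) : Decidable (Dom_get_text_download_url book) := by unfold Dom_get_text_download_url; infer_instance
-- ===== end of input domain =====

-- B replaces A's ordered exact-match loop plus separate prefix-fallback scan with one
-- ranked single pass over the formats items (alternative decomposition, same cost).

-- ===== PORT A =====
def pvTextTypes : List String :=
  ["text/plain; charset=utf-8", "text/plain; charset=us-ascii", "text/plain"]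

-- 'for mime_type in text_types: if mime_type in formats: return formats[mime_type]'
def pvLoopExact (formats : List (String × String)) : List String → Option String
  | [] => none
  | m :: rest =>
    match (PySem.Dict.mk formats).get? m with
    | some u => some u
    | none => pvLoopExact formats rest

-- 'for mime_type, url in formats.items(): if mime_type.startswith("text/plain"): return url'
def pvLoopPrefix : List (String × String) → Option String
  | [] => none
  | (m, u) :: rest => if PySem.Str.startswith m "text/plain" then some u else pvLoopPrefix rest

def get_text_download_url (book : List (String × List (String × String))) : Option String :=
  let formats := (PySem.Dict.mk book).getD "formats" []
  match pvLoopExact formats pvTextTypes with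
  | some u => some u
  | none => pvLoopPrefix formats

-- ===== PORT B =====
def pvRank (m : String) : Option Nat :=
  if m = "text/plain; charset=utf-8" then some 0
  else if m = "text/plain; charset=us-ascii" then some 1
  else if m = "text/plain" then some 2
  else if PySem.Str.startswith m "text/plain" then some 3
  else none

def pvStep (st : Nat × Option String) (p : String × String) : Nat × Option String :=
  match pvRank p.1 with
  | none => st
  | some r => if r < st.1 then (r, some p.2) else st

def get_text_download_url_alt (book : List (String × List (String × String))) : Option String :=
  let formats := (PySem.Dict.mk book).getD "formats" []
  (formats.foldl pvStep (4, none)).2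

-- ===== PRECONDITION & SPEC =====
def Spec_get_text_download_url (book : List (String × List (String × String))) (out : Option String) : Prop := out = get_text_download_url_alt book
instance (book : List (String × List (String × String))) (out : Option String) : Decidable (Spec_get_text_download_url book out) := by unfold Spec_get_text_download_url; infer_instance

-- ===== CLAIM (what is proved, stated in full; the proofs are below) =====
def Claim_equal_get_text_download_url : Prop := ∀ (book : List (String × List (String × String))), Dom_get_text_download_url book → Spec_get_text_download_url book (get_text_download_url book)

-- ===== LEMMAS AND PROOFS =====

-- pvRank classified: which key gives which rank
theorem pvRank_cases {m : String} {r : Nat} (h : pvRank m = some r) :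
    (m = "text/plain; charset=utf-8" ∧ r = 0) ∨
    (m = "text/plain; charset=us-ascii" ∧ r = 1) ∨
    (m = "text/plain" ∧ r = 2) ∨
    (PySem.Str.startswith m "text/plain" = true ∧ r = 3) := by
  unfold pvRank at h
  split_ifs at h <;> simp_all

theorem ne_of_get?_none {l : List (String × String)} {x : String}
    (h : (PySem.Dict.mk l).get? x = none) : ∀ p ∈ l, p.1 ≠ x := by
  induction l with
  | nil => simp
  | cons q rest ih =>
    rw [show (PySem.Dict.mk (q :: rest)) = PySem.Dict.mk ((q.1, q.2) :: rest) by rfl] at h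
    rw [PySem.Dict.get?_mk_cons] at h
    by_cases hq : q.1 == x
    · simp [hq] at h
    · intro p hp
      rcases List.mem_cons.mp hp with hp | hp
      · subst hp; simpa using hq
      · exact ih (by simpa [hq] using h) p hp

-- the fold does not move once no remaining rank beats the accumulator
theorem foldl_step_fix (l : List (String × String)) (b : Nat) (u : Option String)
    (h : ∀ p ∈ l, ∀ r, pvRank p.1 = some r → ¬ r < b) :
    l.foldl pvStep (b, u) = (b, u) := by
  induction l with
  | nil => rfl
  | cons p rest ih =>
    have hstep : pvStep (b, u) p = (b, u) := by
      unfold pvStep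
      cases hr : pvRank p.1 with
      | none => rfl
      | some r => simp [h p (by simp) r hr]
    rw [List.foldl_cons, hstep]
    exact ih (fun q hq r hr => h q (by simp [hq]) r hr)

theorem foldA0 (l : List (String × String)) (u : String) :
    ∀ b : Nat, ∀ u0 : Option String, 0 < b →
    (PySem.Dict.mk l).get? "text/plain; charset=utf-8" = some u →
    (l.foldl pvStep (b, u0)).2 = some u := by
  induction l with
  | nil => intro b u0 _ h; simp [PySem.Dict.get?] at h
  | cons p rest ih =>
    intro b u0 hb h
    rw [show (PySem.Dict.mk (p :: rest)) = PySem.Dict.mk ((p.1, p.2) :: rest) by rfl,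
        PySem.Dict.get?_mk_cons] at h
    by_cases hm : p.1 = "text/plain; charset=utf-8"
    · have hu : p.2 = u := by simp [hm] at h; exact h
      have hstep : pvStep (b, u0) p = (0, some u) := by
        unfold pvStep; simp [pvRank, hm, hb, hu]
      rw [List.foldl_cons, hstep,
          foldl_step_fix rest 0 (some u) (fun q _ r _ => by omega)]
    · have h' : (PySem.Dict.mk rest).get? "text/plain; charset=utf-8" = some u := by
        simpa [hm] using h
      rw [List.foldl_cons]
      unfold pvStep
      cases hr : pvRank p.1 with
      | none => exact ih b u0 hb h'
      | some r =>
        have hrpos : 0 < r := by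
          rcases pvRank_cases hr with ⟨hc, _⟩ | ⟨_, hc⟩ | ⟨_, hc⟩ | ⟨_, hc⟩
          · exact absurd hc hm
          all_goals omega
        by_cases hlt : r < b
        · simp only [hlt, if_true]
          exact ih r (some p.2) hrpos h'
        · simp only [hlt, if_false]
          exact ih b u0 hb h'

theorem foldA1 (l : List (String × String)) (u : String) :
    ∀ b : Nat, ∀ u0 : Option String, 1 < b →
    (PySem.Dict.mk l).get? "text/plain; charset=utf-8" = none →
    (PySem.Dict.mk l).get? "text/plain; charset=us-ascii" = some u →
    (l.foldl pvStep (b, u0)).2 = some u := by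
  induction l with
  | nil => intro b u0 _ _ h; simp [PySem.Dict.get?] at h
  | cons p rest ih =>
    intro b u0 hb h0 h1
    rw [show (PySem.Dict.mk (p :: rest)) = PySem.Dict.mk ((p.1, p.2) :: rest) by rfl,
        PySem.Dict.get?_mk_cons] at h0 h1
    have hm0 : p.1 ≠ "text/plain; charset=utf-8" := by
      intro hc; simp [hc] at h0
    have h0' : (PySem.Dict.mk rest).get? "text/plain; charset=utf-8" = none := by
      simpa [hm0] using h0
    by_cases hm : p.1 = "text/plain; charset=us-ascii"
    · have hu : p.2 = u := by simp [hm] at h1; exact h1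
      have hstep : pvStep (b, u0) p = (1, some u) := by
        unfold pvStep; simp [pvRank, hm, hb, hu]
      rw [List.foldl_cons, hstep,
          foldl_step_fix rest 1 (some u) (fun q hq r hr => by
            rcases pvRank_cases hr with ⟨hc, hrv⟩ | ⟨_, hrv⟩ | ⟨_, hrv⟩ | ⟨_, hrv⟩
            · exact absurd hc (ne_of_get?_none h0' q hq)
            all_goals omega)]
    · have h1' : (PySem.Dict.mk rest).get? "text/plain; charset=us-ascii" = some u := by
        simpa [hm] using h1
      rw [List.foldl_cons]
      unfold pvStep
      cases hr : pvRank p.1 with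
      | none => exact ih b u0 hb h0' h1'
      | some r =>
        have hrpos : 1 < r := by
          rcases pvRank_cases hr with ⟨hc, _⟩ | ⟨hc, _⟩ | ⟨_, hc⟩ | ⟨_, hc⟩
          · exact absurd hc hm0
          · exact absurd hc hm
          all_goals omega
        by_cases hlt : r < b
        · simp only [hlt, if_true]
          exact ih r (some p.2) hrpos h0' h1'
        · simp only [hlt, if_false]
          exact ih b u0 hb h0' h1'

theorem foldA2 (l : List (String × String)) (u : String) :
    ∀ b : Nat, ∀ u0 : Option String, 2 < b →
    (PySem.Dict.mk l).get? "text/plain; charset=utf-8" = none →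
    (PySem.Dict.mk l).get? "text/plain; charset=us-ascii" = none →
    (PySem.Dict.mk l).get? "text/plain" = some u →
    (l.foldl pvStep (b, u0)).2 = some u := by
  induction l with
  | nil => intro b u0 _ _ _ h; simp [PySem.Dict.get?] at h
  | cons p rest ih =>
    intro b u0 hb h0 h1 h2
    rw [show (PySem.Dict.mk (p :: rest)) = PySem.Dict.mk ((p.1, p.2) :: rest) by rfl,
        PySem.Dict.get?_mk_cons] at h0 h1 h2
    have hm0 : p.1 ≠ "text/plain; charset=utf-8" := by intro hc; simp [hc] at h0
    have hm1 : p.1 ≠ "text/plain; charset=us-ascii" := by intro hc; simp [hc] at h1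
    have h0' : (PySem.Dict.mk rest).get? "text/plain; charset=utf-8" = none := by
      simpa [hm0] using h0
    have h1' : (PySem.Dict.mk rest).get? "text/plain; charset=us-ascii" = none := by
      simpa [hm1] using h1
    by_cases hm : p.1 = "text/plain"
    · have hu : p.2 = u := by simp [hm] at h2; exact h2
      have hstep : pvStep (b, u0) p = (2, some u) := by
        unfold pvStep; simp [pvRank, hm, hb, hu]
      rw [List.foldl_cons, hstep,
          foldl_step_fix rest 2 (some u) (fun q hq r hr => by
            rcases pvRank_cases hr with ⟨hc, hrv⟩ | ⟨hc, hrv⟩ | ⟨_, hrv⟩ | ⟨_, hrv⟩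
            · exact absurd hc (ne_of_get?_none h0' q hq)
            · exact absurd hc (ne_of_get?_none h1' q hq)
            all_goals omega)]
    · have h2' : (PySem.Dict.mk rest).get? "text/plain" = some u := by
        simpa [hm] using h2
      rw [List.foldl_cons]
      unfold pvStep
      cases hr : pvRank p.1 with
      | none => exact ih b u0 hb h0' h1' h2'
      | some r =>
        have hrpos : 2 < r := by
          rcases pvRank_cases hr with ⟨hc, _⟩ | ⟨hc, _⟩ | ⟨hc, _⟩ | ⟨_, hc⟩
          · exact absurd hc hm0
          · exact absurd hc hm1
          · exact absurd hc hm
          · omega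
        by_cases hlt : r < b
        · simp only [hlt, if_true]
          exact ih r (some p.2) hrpos h0' h1' h2'
        · simp only [hlt, if_false]
          exact ih b u0 hb h0' h1' h2'

theorem foldA3 (l : List (String × String))
    (h0 : (PySem.Dict.mk l).get? "text/plain; charset=utf-8" = none)
    (h1 : (PySem.Dict.mk l).get? "text/plain; charset=us-ascii" = none)
    (h2 : (PySem.Dict.mk l).get? "text/plain" = none) :
    (l.foldl pvStep (4, none)).2 = pvLoopPrefix l := by
  induction l with
  | nil => rfl
  | cons p rest ih =>
    rw [show (PySem.Dict.mk (p :: rest)) = PySem.Dict.mk ((p.1, p.2) :: rest) by rfl,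
        PySem.Dict.get?_mk_cons] at h0 h1 h2
    have hm0 : p.1 ≠ "text/plain; charset=utf-8" := by intro hc; simp [hc] at h0
    have hm1 : p.1 ≠ "text/plain; charset=us-ascii" := by intro hc; simp [hc] at h1
    have hm2 : p.1 ≠ "text/plain" := by intro hc; simp [hc] at h2
    have h0' : (PySem.Dict.mk rest).get? "text/plain; charset=utf-8" = none := by
      simpa [hm0] using h0
    have h1' : (PySem.Dict.mk rest).get? "text/plain; charset=us-ascii" = none := by
      simpa [hm1] using h1
    have h2' : (PySem.Dict.mk rest).get? "text/plain" = none := by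
      simpa [hm2] using h2
    by_cases hpre : PySem.Str.startswith p.1 "text/plain" = true
    · have hr3 : pvRank p.1 = some 3 := by
        unfold pvRank; rw [if_neg hm0, if_neg hm1, if_neg hm2, if_pos hpre]
      have hstep : pvStep (4, none) p = (3, some p.2) := by
        unfold pvStep; rw [hr3]; rfl
      rw [List.foldl_cons, hstep,
          foldl_step_fix rest 3 (some p.2) (fun q hq r hr => by
            rcases pvRank_cases hr with ⟨hc, hrv⟩ | ⟨hc, hrv⟩ | ⟨hc, hrv⟩ | ⟨_, hrv⟩
            · exact absurd hc (ne_of_get?_none h0' q hq)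
            · exact absurd hc (ne_of_get?_none h1' q hq)
            · exact absurd hc (ne_of_get?_none h2' q hq)
            · omega)]
      obtain ⟨m, w⟩ := p
      simp only [pvLoopPrefix]
      simp_all
    · have hrn : pvRank p.1 = none := by
        unfold pvRank; rw [if_neg hm0, if_neg hm1, if_neg hm2, if_neg hpre]
      have hstep : pvStep (4, none) p = (4, none) := by
        unfold pvStep; rw [hrn]
      rw [List.foldl_cons, hstep]
      obtain ⟨m, w⟩ := p
      simp only [pvLoopPrefix]
      simp_all

-- ===== VERDICT (by name: the statement is the Claim_ definition above) =====
theorem get_text_download_url_spec : Claim_equal_get_text_download_url := by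
  intro book _
  unfold Spec_get_text_download_url get_text_download_url get_text_download_url_alt
  set f := (PySem.Dict.mk book).getD "formats" [] with hf
  simp only [pvLoopExact, pvTextTypes]
  cases h0 : (PySem.Dict.mk f).get? "text/plain; charset=utf-8" with
  | some u => simp [foldA0 f u 4 none (by omega) h0]
  | none =>
    cases h1 : (PySem.Dict.mk f).get? "text/plain; charset=us-ascii" with
    | some u => simp [foldA1 f u 4 none (by omega) h0 h1]
    | none =>
      cases h2 : (PySem.Dict.mk f).get? "text/plain" with
      | some u => simp [foldA2 f u 4 none (by omega) h0 h1 h2]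
      | none => simp [foldA3 f h0 h1 h2]
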